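-- pv_equiv track=rewrite | github.com/Vassah/CS61A | HW4.py | make_deductions
-- ===== SOURCE A (Python) =====
-- def make_deductions(possible_subsets, letters):
--   nilletrus = []
--   letrus = []
--   nonpossible = []
--   possible = []
--   for i in letters:
--     for poss in possible_subsets:
--       if i not in poss:
--         nonpossible.append(i)
--       if i in poss:
--         possible.append(i)
--     if i not in nonpossible:
--       letrus.append(i)
--     if i not in possible:
--       nilletrus.append(i)
--   return letrus, nilletrus
-- ===== SOURCE B (Python) =====
-- def make_deductions(possible_subsets, letters):
--     union = set()
--     inter = None
--     for poss in possible_subsets: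
--         s = set(poss)
--         union |= s
--         inter = s if inter is None else inter & s
--     letrus = [i for i in letters if inter is None or i in inter]
--     nilletrus = [i for i in letters if i not in union]
--     return letrus, nilletrus
-- ===== Notes on version B (the rewrite author's own statement) =====
-- stated objective: faster
-- what changed: B precomputes the union and intersection of all subsets once in a single pass and classifies each letter by set lookup, instead of A's per-letter rescan of every subset with membership tests against ever-growing accumulator lists.
import Mathlib
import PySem

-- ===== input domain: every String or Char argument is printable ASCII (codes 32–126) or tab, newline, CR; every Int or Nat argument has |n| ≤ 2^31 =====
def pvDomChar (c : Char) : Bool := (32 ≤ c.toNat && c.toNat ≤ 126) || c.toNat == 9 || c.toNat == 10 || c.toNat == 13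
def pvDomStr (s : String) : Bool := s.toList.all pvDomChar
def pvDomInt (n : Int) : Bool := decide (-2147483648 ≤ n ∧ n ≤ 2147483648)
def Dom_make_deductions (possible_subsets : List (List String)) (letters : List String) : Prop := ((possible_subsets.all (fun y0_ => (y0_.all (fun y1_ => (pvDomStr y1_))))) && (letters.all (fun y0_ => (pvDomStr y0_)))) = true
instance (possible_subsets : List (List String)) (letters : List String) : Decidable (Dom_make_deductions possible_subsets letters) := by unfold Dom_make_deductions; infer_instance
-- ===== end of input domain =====

-- B precomputes the union and intersection of all subsets once and classifies each
-- letter by set lookup, replacing A's per-letter rescan of every subset (faster).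


-- ===== PORT A =====
-- inner 'for poss in possible_subsets' loop: threads (nonpossible, possible)
def mdInner (i : String) (subs : List (List String)) (np pos : List String) :
    List String × List String :=
  match subs with
  | [] => (np, pos)
  | poss :: rest =>
      mdInner i rest
        (if i ∈ poss then np else np ++ [i])
        (if i ∈ poss then pos ++ [i] else pos)

-- outer 'for i in letters' loop: threads (nilletrus, letrus, nonpossible, possible)
def mdOuter (subs : List (List String)) (ls : List String)
    (nilletrus letrus np pos : List String) : List String × List String :=
  match ls with
  | [] => (letrus, nilletrus)
  | i :: rest =>
      let r := mdInner i subs np pos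
      mdOuter subs rest
        (if i ∈ r.2 then nilletrus else nilletrus ++ [i])
        (if i ∈ r.1 then letrus else letrus ++ [i])
        r.1 r.2

def make_deductions (possible_subsets : List (List String)) (letters : List String) :
    List String × List String :=
  mdOuter possible_subsets letters [] [] [] []

-- ===== PORT B =====
-- the single pass of Source B: builds (union, inter) over the subsets
def bFold (subs : List (List String)) (acc : PySem.Set String × Option (PySem.Set String)) :
    PySem.Set String × Option (PySem.Set String) :=
  subs.foldl (fun p poss =>
    (PySem.Set.union p.1 (PySem.Set.ofList poss),
     match p.2 with
     | none => some (PySem.Set.ofList poss)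
     | some t => some (PySem.Set.inter t (PySem.Set.ofList poss)))) acc

def make_deductions_alt (possible_subsets : List (List String)) (letters : List String) :
    List String × List String :=
  let p := bFold possible_subsets (PySem.Set.empty, none)
  (letters.filter (fun i => match p.2 with | none => true | some t => PySem.Set.contains t i),
   letters.filter (fun i => !(PySem.Set.contains p.1 i)))

-- ===== PRECONDITION & SPEC =====
def Spec_make_deductions (possible_subsets : List (List String)) (letters : List String) (out : List String × List String) : Prop := out = make_deductions_alt possible_subsets letters
instance (possible_subsets : List (List String)) (letters : List String) (out : List String × List String) : Decidable (Spec_make_deductions possible_subsets letters out) := by unfold Spec_make_deductions; infer_instance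

-- ===== CLAIM (what is proved, stated in full; the proofs are below) =====
def Claim_equal_make_deductions : Prop := ∀ (possible_subsets : List (List String)) (letters : List String), Dom_make_deductions possible_subsets letters → Spec_make_deductions possible_subsets letters (make_deductions possible_subsets letters)

-- ===== LEMMAS AND PROOFS =====

theorem mdInner_fst_mem (i x : String) (subs : List (List String)) (np pos : List String) :
    x ∈ (mdInner i subs np pos).1 ↔ x ∈ np ∨ (x = i ∧ ∃ p ∈ subs, i ∉ p) := by
  induction subs generalizing np pos with
  | nil => simp [mdInner]
  | cons poss rest ih =>
      simp only [mdInner, ih]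
      by_cases h : i ∈ poss <;> simp [h] <;> tauto

theorem mdInner_snd_mem (i x : String) (subs : List (List String)) (np pos : List String) :
    x ∈ (mdInner i subs np pos).2 ↔ x ∈ pos ∨ (x = i ∧ ∃ p ∈ subs, i ∈ p) := by
  induction subs generalizing np pos with
  | nil => simp [mdInner]
  | cons poss rest ih =>
      simp only [mdInner, ih]
      by_cases h : i ∈ poss <;> simp [h] <;> tauto

theorem mdOuter_eq (subs : List (List String)) (ls nill letrus np pos : List String)
    (hnp : ∀ x ∈ np, ∃ p ∈ subs, x ∉ p)
    (hpos : ∀ x ∈ pos, ∃ p ∈ subs, x ∈ p) :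
    mdOuter subs ls nill letrus np pos =
      (letrus ++ ls.filter (fun i => decide (∀ p ∈ subs, i ∈ p)),
       nill ++ ls.filter (fun i => decide (∀ p ∈ subs, i ∉ p))) := by
  induction ls generalizing nill letrus np pos with
  | nil => simp [mdOuter]
  | cons i rest ih =>
      have h1 : i ∈ (mdInner i subs np pos).1 ↔ ∃ p ∈ subs, i ∉ p := by
        rw [mdInner_fst_mem]
        constructor
        · rintro (h | ⟨_, h⟩)
          · exact hnp i h
          · exact h
        · exact fun h => Or.inr ⟨rfl, h⟩
      have h2 : i ∈ (mdInner i subs np pos).2 ↔ ∃ p ∈ subs, i ∈ p := by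
        rw [mdInner_snd_mem]
        constructor
        · rintro (h | ⟨_, h⟩)
          · exact hpos i h
          · exact h
        · exact fun h => Or.inr ⟨rfl, h⟩
      have hnp' : ∀ x ∈ (mdInner i subs np pos).1, ∃ p ∈ subs, x ∉ p := by
        intro x hx
        rcases (mdInner_fst_mem i x subs np pos).1 hx with h | ⟨rfl, h⟩
        · exact hnp x h
        · exact h
      have hpos' : ∀ x ∈ (mdInner i subs np pos).2, ∃ p ∈ subs, x ∈ p := by
        intro x hx
        rcases (mdInner_snd_mem i x subs np pos).1 hx with h | ⟨rfl, h⟩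
        · exact hpos x h
        · exact h
      have e1 : (∃ x ∈ subs, i ∉ x) ↔ ¬ ∀ p ∈ subs, i ∈ p := by
        constructor
        · rintro ⟨p, hp, hn⟩ h; exact hn (h p hp)
        · intro h; push_neg at h; exact h
      have e2 : (∃ x ∈ subs, i ∈ x) ↔ ¬ ∀ p ∈ subs, i ∉ p := by
        constructor
        · rintro ⟨p, hp, hn⟩ h; exact (h p hp) hn
        · intro h; push_neg at h; simpa using h
      simp only [mdOuter, ih _ _ _ _ hnp' hpos', List.filter_cons, h1, h2, Prod.mk.injEq]
      constructor
      · by_cases ha : ∀ p ∈ subs, i ∈ p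
        · rw [if_neg (fun hc => e1.mp hc ha), if_pos (decide_eq_true ha)]; simp
        · rw [if_pos (e1.mpr ha), if_neg (fun h => ha (of_decide_eq_true h))]
      · by_cases hb : ∀ p ∈ subs, i ∉ p
        · rw [if_neg (fun hc => e2.mp hc hb), if_pos (decide_eq_true hb)]; simp
        · rw [if_pos (e2.mpr hb), if_neg (fun h => hb (of_decide_eq_true h))]

theorem bFold_fst_mem (subs : List (List String)) (acc : PySem.Set String × Option (PySem.Set String)) (x : String) :
    x ∈ (bFold subs acc).1 ↔ x ∈ acc.1 ∨ ∃ p ∈ subs, x ∈ p := by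
  induction subs generalizing acc with
  | nil => simp [bFold]
  | cons poss rest ih =>
      simp only [bFold, List.foldl_cons] at *
      rw [ih]
      simp [PySem.Set.mem_union, PySem.Set.mem_ofList]
      tauto

theorem bFold_some (subs : List (List String)) (u t : PySem.Set String) :
    ∃ t', (bFold subs (u, some t)).2 = some t' ∧
      ∀ x, (x ∈ t' ↔ x ∈ t ∧ ∀ p ∈ subs, x ∈ p) := by
  induction subs generalizing u t with
  | nil => exact ⟨t, rfl, by simp⟩
  | cons poss rest ih =>
      obtain ⟨t', h1, h2⟩ := ih (PySem.Set.union u (PySem.Set.ofList poss))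
        (PySem.Set.inter t (PySem.Set.ofList poss))
      refine ⟨t', h1, fun x => ?_⟩
      rw [h2]
      simp [PySem.Set.mem_inter, PySem.Set.mem_ofList]
      tauto

theorem make_deductions_spec : Claim_equal_make_deductions := by
  unfold Claim_equal_make_deductions
  intro subs letters _
  unfold Spec_make_deductions
  unfold make_deductions make_deductions_alt
  rw [mdOuter_eq subs letters [] [] [] [] (by simp) (by simp)]
  simp only [List.nil_append]
  have hu : ∀ i : String,
      (!(PySem.Set.contains (bFold subs (PySem.Set.empty, none)).1 i)) =
      decide (∀ p ∈ subs, i ∉ p) := by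
    intro i
    have := bFold_fst_mem subs (PySem.Set.empty, none) i
    simp only [PySem.Set.empty] at this
    rw [Bool.eq_iff_iff]
    simp [this, not_exists]
  have hi : ∀ i : String,
      (match (bFold subs (PySem.Set.empty, none)).2 with
       | none => true
       | some t => PySem.Set.contains t i) = decide (∀ p ∈ subs, i ∈ p) := by
    intro i
    cases subs with
    | nil => simp [bFold]
    | cons poss rest =>
        have hstep : bFold (poss :: rest) (PySem.Set.empty, none) =
            bFold rest (PySem.Set.union PySem.Set.empty (PySem.Set.ofList poss),
              some (PySem.Set.ofList poss)) := rfl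
        obtain ⟨t', h1, h2⟩ := bFold_some rest
          (PySem.Set.union PySem.Set.empty (PySem.Set.ofList poss)) (PySem.Set.ofList poss)
        rw [hstep, h1]
        rw [Bool.eq_iff_iff]
        simp [h2, PySem.Set.mem_ofList]
  exact Prod.ext (List.filter_congr fun i _ => (hi i).symm)
    (List.filter_congr fun i _ => (hu i).symm)
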